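-- pv_equiv track=rewrite | github.com/1749352844/digital_match | answer.py | get_high_score
-- ===== SOURCE A (Python) =====
-- def get_high_score(desk, mine):
--     """获取最高分 -- 使用二分查找，需要对数组做排序"""
--     # 结果集初始化 & 二分查找前的数组排序
--     result, score = [], 0
--     mine = quick_sort(arr=mine)
--     # 获取编排后的数组 & 最高分
--     for i in desk:
--         status, index = binary_search(mine, num=i+1)
--         if status:
--             score += 1
--         result.append(mine.pop(index))
--     return result, score
--
-- def quick_sort(arr):
--     """普通的递归版快速排序，O(nlogn)"""
--     if len(arr) < 2:
--         return arr
--     # 选取中位数做基准值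
--     mid = arr[len(arr) // 2]
--     # 定义基准值左右两个数组
--     left, right = [], []
--     # 从原始数组中移除基准值
--     arr.remove(mid)
--     for item in arr:
--         # 大于基准值放右边
--         if item >= mid:
--             right.append(item)
--         else:
--             # 小于基准值放左边
--             left.append(item)
--     # 使用迭代进行比较
--     return quick_sort(left) + [mid] + quick_sort(right)
--
-- def binary_search(arr, num):
--     """场景化的二分查找，O(nlogn)"""
--     # 偏移量初始化
--     first, last = 0, len(arr) - 1
--     # 结果集状态和索引
--     status, index = False, 0
--     # 查找开始..
--     while first <= last:
--         mid = (last + first) // 2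
--         if arr[mid] > num:
--             last = mid - 1
--             status, index = True, mid
--         elif arr[mid] < num:
--             first = mid + 1
--         else:
--             return True, mid
--     return status, index
-- ===== SOURCE B (Python) =====
-- def get_high_score(desk, mine):
--     # Offline two-pointer + disjoint-set "next alive" successor structure:
--     # sort mine once; compute every desk card's static cut position (first sorted-mine
--     # index with a strictly greater value) in ONE merge pass over desk sorted by value;
--     # then answer the desk cards in original order, finding/deleting the chosen card by
--     # path-halving pointer jumps -- no binary search and no list.pop at all.
--     sm = sorted(mine)
--     m = len(sm)
--     cut = [0] * len(desk)
--     t = 0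
--     for j, v in sorted(enumerate(desk), key=lambda p: p[1]):
--         while t < m and sm[t] <= v:
--             t += 1
--         cut[j] = t
--     nxt = list(range(m + 1))  # nxt[p]: a not-yet-taken position >= p (m = none)
--
--     def find(p):
--         while nxt[p] != p:
--             nxt[p] = nxt[nxt[p]]
--             p = nxt[p]
--         return p
--
--     result, score = [], 0
--     for j in range(len(desk)):
--         p = find(cut[j])
--         if p < m:
--             score += 1
--         else:
--             p = find(0)
--         result.append(sm[p])
--         nxt[p] = p + 1
--     return result, score
-- ===== Notes on version B (the rewrite author's own statement) =====
-- stated objective: faster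
-- what changed: Replaces per-card binary search on a shrinking list plus list.pop by an offline algorithm: one library sort of mine, one merge pass over desk sorted by value that precomputes every card's static cut position, and a disjoint-set next-alive pointer array (path halving) that finds and deletes the chosen card by pointer jumps, so there is no binary search and no pop at all.
import Mathlib
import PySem

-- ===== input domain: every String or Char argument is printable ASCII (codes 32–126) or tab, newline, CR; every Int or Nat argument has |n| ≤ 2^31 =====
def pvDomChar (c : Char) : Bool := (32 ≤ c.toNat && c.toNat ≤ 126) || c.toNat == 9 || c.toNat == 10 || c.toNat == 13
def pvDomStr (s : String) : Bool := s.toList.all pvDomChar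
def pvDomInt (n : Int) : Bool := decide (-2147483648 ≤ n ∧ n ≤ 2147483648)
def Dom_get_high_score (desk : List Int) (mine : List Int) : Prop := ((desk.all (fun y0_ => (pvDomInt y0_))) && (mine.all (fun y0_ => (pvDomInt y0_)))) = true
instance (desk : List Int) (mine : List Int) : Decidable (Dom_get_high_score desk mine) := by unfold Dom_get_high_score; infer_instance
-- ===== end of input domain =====

-- B answers the same greedy matching by an offline two-pointer pass plus a disjoint-set
-- "next alive" pointer array instead of per-card binary search and list.pop (A also mutates
-- the caller's `mine` via its quicksort; equivalence here is about the return value only).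


-- ===== PORT A =====

-- the partition for-loop of quick_sort, as a tail recursion over the same (left, right) state
def pvQsPart (mid : Int) : List Int → List Int × List Int → List Int × List Int
  | [], acc => acc
  | x :: xs, acc =>
      if mid ≤ x then pvQsPart mid xs (acc.1, acc.2 ++ [x])
      else pvQsPart mid xs (acc.1 ++ [x], acc.2)

-- fuel (= len(arr) at the top call) only makes the recursion structural; it is never
-- exhausted: each recursive call drops one element, so fuel ≥ len(arr) is invariant
def quickSortA : Nat → List Int → List Int
  | 0, arr => arr
  | fuel + 1, arr =>
    if arr.length < 2 then arr
    else
      let mid := (PySem.List.pyGet? arr (PySem.Int.floordiv (arr.length : Int) 2)).getD 0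
      let arr' := (PySem.List.remove? arr mid).getD arr
      quickSortA fuel (pvQsPart mid arr' ([], [])).1 ++ mid :: quickSortA fuel (pvQsPart mid arr' ([], [])).2

-- the while loop of binary_search; fuel (= len(arr)+1 at the top call) only makes it
-- structural and is never exhausted: the interval [first, last] shrinks every iteration
def pvBSearch (arr : List Int) (num : Int) : Nat → Int → Int → Bool → Int → Bool × Int
  | 0, _, _, status, index => (status, index)
  | fuel + 1, first, last, status, index =>
    if first ≤ last then
      let mid := PySem.Int.floordiv (last + first) 2
      match PySem.List.pyGet? arr mid with
      | some v =>
          if num < v then pvBSearch arr num fuel first (mid - 1) true mid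
          else if v < num then pvBSearch arr num fuel (mid + 1) last status index
          else (true, mid)
      | none => (status, index)  -- unreachable from pvBSearchTop: mid is always in range there
    else (status, index)

def pvBSearchTop (arr : List Int) (num : Int) : Bool × Int :=
  pvBSearch arr num (arr.length + 1) 0 ((arr.length : Int) - 1) false 0

-- body of A's for-loop over desk; state = (result, score, mine)
def pvStepA (s : List Int × Int × List Int) (i : Int) : List Int × Int × List Int :=
  let bi := pvBSearchTop s.2.2 (i + 1)
  let score' := if bi.1 then s.2.1 + 1 else s.2.1
  match PySem.List.pop? s.2.2 bi.2 with
  | some (v, m') => (s.1 ++ [v], score', m')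
  | none => (s.1, score', s.2.2)  -- unreachable under Pre_ (Python raises IndexError)

def get_high_score (desk : List Int) (mine : List Int) : List Int × Int :=
  let s := desk.foldl pvStepA ([], 0, quickSortA mine.length mine)
  (s.1, s.2.1)

-- ===== PORT B =====

-- B's inner `while t < m and sm[t] <= v: t += 1` (the merge pass's pointer advance);
-- fuel (= len(sm)+1) only makes it structural and is never exhausted (t stops at len(sm))
def pvAdvance (sm : List Int) (v : Int) : Nat → Nat → Nat
  | 0, t => t
  | fuel + 1, t => if t < sm.length ∧ sm.getD t 0 ≤ v then pvAdvance sm v fuel (t + 1) else t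

-- B's first pass: `for j, v in sorted(enumerate(desk), key=...): ...; cut[j] = t`
def pvCutFold (sm : List Int) (ps : List (Int × Int)) (cut : List Nat) (t : Nat) : List Nat × Nat :=
  ps.foldl (fun s jv => let t' := pvAdvance sm jv.2 (sm.length + 1) s.2; (s.1.set jv.1.toNat t', t')) (cut, t)

-- B's `find` with path halving; fuel (= len(nxt) at every call) only makes it total,
-- the pointer invariant proved below shows it is never exhausted
def pvFind (nxt : List Nat) (p : Nat) : Nat → Nat × List Nat
  | 0 => (p, nxt)
  | fuel + 1 =>
      let q := nxt.getD p 0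
      if q = p then (p, nxt)
      else pvFind (nxt.set p (nxt.getD q 0)) (nxt.getD q 0) fuel

-- body of B's answering loop; state = (result, score, nxt)
def pvStepB (sm : List Int) (s : List Int × Int × List Nat) (c : Nat) : List Int × Int × List Nat :=
  let f := pvFind s.2.2 c s.2.2.length
  if f.1 < sm.length then
    (s.1 ++ [sm.getD f.1 0], s.2.1 + 1, f.2.set f.1 (f.1 + 1))
  else
    let g := pvFind f.2 0 f.2.length
    (s.1 ++ [sm.getD g.1 0], s.2.1, g.2.set g.1 (g.1 + 1))

def get_high_score_alt (desk : List Int) (mine : List Int) : List Int × Int :=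
  let sm := PySem.List.sorted mine (fun x => x) false
  let cut := (pvCutFold sm (PySem.List.sorted (PySem.List.enumerate desk) (fun p => p.2) false)
      (List.replicate desk.length 0) 0).1
  let s := (List.range desk.length).foldl (fun s j => pvStepB sm s (cut.getD j 0))
      ([], 0, List.range (sm.length + 1))
  (s.1, s.2.1)

-- ===== PRECONDITION & SPEC =====
-- Pre_ excludes exactly the inputs with len(desk) > len(mine), on which A raises IndexError (pop from empty list).
def Pre_get_high_score (desk : List Int) (mine : List Int) : Prop := desk.length ≤ mine.length
instance (desk : List Int) (mine : List Int) : Decidable (Pre_get_high_score desk mine) := by unfold Pre_get_high_score; infer_instance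
def pvWitness_get_high_score : List Int × List Int := ([1, 2, 0], [0, 3, 2, 1])

def Spec_get_high_score (desk : List Int) (mine : List Int) (out : List Int × Int) : Prop := out = get_high_score_alt desk mine
instance (desk : List Int) (mine : List Int) (out : List Int × Int) : Decidable (Spec_get_high_score desk mine out) := by unfold Spec_get_high_score; infer_instance

-- ===== CLAIM (what is proved, stated in full; the proofs are below) =====
def Claim_equal_get_high_score : Prop := ∀ (desk : List Int) (mine : List Int), Dom_get_high_score desk mine → Pre_get_high_score desk mine → Spec_get_high_score desk mine (get_high_score desk mine)

-- ===== LEMMAS AND PROOFS =====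

-- ---------- generic list helpers ----------

theorem pvGetBangAppend {X : List Int} {y : Int} {Y : List Int} :
    ∀ (k : Nat), k < X.length → (X ++ y :: Y)[k]! = X[k]! := by
  induction X with
  | nil => intro k hk; simp at hk
  | cons a X ih =>
      intro k hk
      cases k with
      | zero => simp
      | succ k => simpa using ih k (by simpa using hk)

theorem pvGetBangMid : ∀ (X : List Int) (y : Int) (Y : List Int), (X ++ y :: Y)[X.length]! = y := by
  intro X y Y
  induction X with
  | nil => simp
  | cons a X ih => simpa using ih

theorem pvEraseIdxMid : ∀ (X : List α) (y : α) (Y : List α), (X ++ y :: Y).eraseIdx X.length = X ++ Y := by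
  intro X y Y
  induction X with
  | nil => simp [List.eraseIdx]
  | cons a X ih => simpa [List.eraseIdx] using ih

theorem pvMapRangeGetBang (l : List Int) : (List.range l.length).map (fun j => l[j]!) = l := by
  apply List.ext_getElem
  · simp
  · intro k h1 h2
    simp only [List.getElem_map, List.getElem_range]
    exact getElem!_pos l k h2

theorem pvGetDSet (l : List Nat) (p v x : Nat) (hp : p < l.length) :
    (l.set p v).getD x 0 = if x = p then v else l.getD x 0 := by
  by_cases hx : x = p
  · subst hx; simp [List.getD, List.getElem?_set, hp]
  · have hpx : p ≠ x := fun h => hx h.symm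
    simp [List.getD, List.getElem?_set, hpx]
    intro h
    exact absurd h hx

-- ---------- takeWhile characterisation ----------

theorem pvTW_low (P : Int → Bool) : ∀ (xs : List Int) (k : Nat),
    k < (xs.takeWhile P).length → P xs[k]! = true := by
  intro xs
  induction xs with
  | nil => intro k hk; simp [List.takeWhile] at hk
  | cons x xs ih =>
      intro k hk
      by_cases hx : P x
      · cases k with
        | zero => simpa using hx
        | succ k =>
            simp only [List.takeWhile_cons, hx, if_true, List.length_cons] at hk
            simpa using ih k (by omega)
      · simp [List.takeWhile_cons, hx] at hk

theorem pvTW_hi (P : Int → Bool) : ∀ (xs : List Int),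
    (xs.takeWhile P).length < xs.length → P xs[(xs.takeWhile P).length]! = false := by
  intro xs
  induction xs with
  | nil => intro h; simp at h
  | cons x xs ih =>
      intro h
      by_cases hx : P x
      · simp only [List.takeWhile_cons, hx, if_true, List.length_cons] at h ⊢
        simpa using ih (by omega)
      · simpa [List.takeWhile_cons, hx] using hx

theorem pvTW_le (P : Int → Bool) (xs : List Int) : (xs.takeWhile P).length ≤ xs.length :=
  (List.takeWhile_prefix P).sublist.length_le

theorem pvTW_char (P : Int → Bool) : ∀ (xs : List Int) (c : Nat), c ≤ xs.length →
    (∀ k, k < c → P xs[k]! = true) → (c < xs.length → P xs[c]! = false) →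
    (xs.takeWhile P).length = c := by
  intro xs
  induction xs with
  | nil => intro c hc _ _; simp at hc ⊢; omega
  | cons x xs ih =>
      intro c hc hlow hhi
      cases c with
      | zero =>
          have := hhi (by simp)
          simp only [List.takeWhile_cons]
          simp at this
          simp [this]
      | succ c =>
          have hx : P x = true := by simpa using hlow 0 (by omega)
          simp only [List.takeWhile_cons, hx, if_true, List.length_cons]
          rw [ih c (by simpa using hc)
              (fun k hk => by simpa using hlow (k + 1) (by omega))
              (fun h => by simpa using hhi (by simpa using h))]

-- count of elements ≤ i in the sorted pool (B's "cut" position)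
def pvCLE (sm : List Int) (i : Int) : Nat := (sm.takeWhile (fun x => decide (x ≤ i))).length

theorem pvCLE_le (sm : List Int) (i : Int) : pvCLE sm i ≤ sm.length := pvTW_le _ _

theorem pvCLE_low (sm : List Int) (i : Int) : ∀ k, k < pvCLE sm i → sm[k]! ≤ i := by
  intro k hk
  have := pvTW_low (fun x => decide (x ≤ i)) sm k hk
  simpa using this

-- getElem! monotonicity on a sorted list
theorem pvSortedMono (m : List Int) (hs : m.Pairwise (· ≤ ·)) {a b : Nat}
    (hab : a ≤ b) (hb : b < m.length) : m[a]! ≤ m[b]! := by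
  rcases lt_or_eq_of_le hab with h | h
  · have := List.pairwise_iff_getElem.mp hs a b (lt_trans h hb) hb h
    rwa [getElem!_pos m a (lt_trans h hb), getElem!_pos m b hb]
  · subst h; rfl

theorem pvCLE_high (sm : List Int) (hs : sm.Pairwise (· ≤ ·)) (i : Int) :
    ∀ k, pvCLE sm i ≤ k → k < sm.length → i < sm[k]! := by
  intro k h1 h2
  have hlo : pvCLE sm i < sm.length := by omega
  have := pvTW_hi (fun x => decide (x ≤ i)) sm hlo
  simp only [decide_eq_false_iff_not, not_le] at this
  exact lt_of_lt_of_le this (pvSortedMono sm hs h1 h2)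

-- ---------- A's step equals the canonical "pop first strictly greater (else head)" step ----------

def pvCanon (s : List Int × Int × List Int) (i : Int) : List Int × Int × List Int :=
  let rem := s.2.2
  let lo := pvCLE rem i
  if lo < rem.length then (s.1 ++ [rem[lo]!], s.2.1 + 1, rem.eraseIdx lo)
  else (s.1 ++ [rem[0]!], s.2.1, rem.eraseIdx 0)

-- erasing either of two equal positions of a sorted list gives the same list
theorem pvEraseEqAux (m : List Int) (hs : m.Pairwise (· ≤ ·)) (a b : Nat)
    (hab : a ≤ b) (hb : b < m.length) (hv : m[a]! = m[b]!) : m.eraseIdx a = m.eraseIdx b := by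
  have ha : a < m.length := lt_of_le_of_lt hab hb
  apply List.ext_getElem
  · simp [List.length_eraseIdx, ha, hb]
  · intro j h1 h2
    have hj : j < m.length - 1 := by simpa [List.length_eraseIdx, ha] using h1
    rw [List.getElem_eraseIdx, List.getElem_eraseIdx]
    by_cases hja : j < a
    · rw [dif_pos hja, dif_pos (lt_of_lt_of_le hja hab)]
    · by_cases hjb : j < b
      · rw [dif_neg hja, dif_pos hjb]
        have e1 : m[a]! ≤ m[j]! := pvSortedMono m hs (by omega) (by omega)
        have e2 : m[j]! ≤ m[j + 1]! := pvSortedMono m hs (by omega) (by omega)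
        have e3 : m[j + 1]! ≤ m[b]! := pvSortedMono m hs (by omega) hb
        have : m[j]! = m[j + 1]! := by omega
        rw [getElem!_pos m j (by omega), getElem!_pos m (j + 1) (by omega)] at this
        exact this.symm
      · rw [dif_neg hja, dif_neg hjb]

theorem pvEraseEq (m : List Int) (hs : m.Pairwise (· ≤ ·)) : ∀ (a b : Nat),
    a < m.length → b < m.length → m[a]! = m[b]! → m.eraseIdx a = m.eraseIdx b := by
  intro a b ha hb hv
  rcases le_total a b with h | h
  · exact pvEraseEqAux m hs a b h hb hv
  · exact (pvEraseEqAux m hs b a h ha hv.symm).symm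

theorem pvBSearchExit (arr : List Int) (num first last : Int) (status : Bool) (index : Int)
    (hgt : last < first)
    (hinv : if status then index = last + 1 ∧ 0 ≤ index ∧ index < (arr.length : Int) ∧ num < arr[index.toNat]!
            else index = 0 ∧ last = (arr.length : Int) - 1)
    (hleft : ∀ k : Nat, k < arr.length → (k : Int) < first → arr[k]! < num) :
    (if ((status, index) : Bool × Int).1 then
       0 ≤ ((status, index) : Bool × Int).2 ∧
       ((status, index) : Bool × Int).2 < (arr.length : Int) ∧
       num ≤ arr[((status, index) : Bool × Int).2.toNat]! ∧
       (∀ k : Nat, k < ((status, index) : Bool × Int).2.toNat →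
          arr[k]! < num ∨ arr[k]! = arr[((status, index) : Bool × Int).2.toNat]!)
     else ((status, index) : Bool × Int).2 = 0 ∧
          (∀ k : Nat, k < arr.length → arr[k]! < num)) := by
  by_cases hst : status = true
  · simp only [hst, if_true] at hinv ⊢
    obtain ⟨hi1, hi2, hi3, hi4⟩ := hinv
    refine ⟨hi2, hi3, le_of_lt hi4, ?_⟩
    intro k hk
    left; exact hleft k (by omega) (by omega)
  · have hst' : status = false := by revert hst; cases status <;> simp
    simp only [hst', Bool.false_eq_true, if_false] at hinv ⊢
    obtain ⟨hi0, hlast⟩ := hinv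
    exact ⟨hi0, fun k hk => hleft k hk (by omega)⟩

theorem pvBSearch_spec (arr : List Int) (num : Int) (hs : arr.Pairwise (· ≤ ·)) :
    ∀ (fuel : Nat) (first last : Int) (status : Bool) (index : Int),
      (last - first + 1).toNat ≤ fuel →
      0 ≤ first →
      (if status then index = last + 1 ∧ 0 ≤ index ∧ index < (arr.length : Int) ∧ num < arr[index.toNat]!
       else index = 0 ∧ last = (arr.length : Int) - 1) →
      (∀ k : Nat, k < arr.length → (k : Int) < first → arr[k]! < num) →
      (if (pvBSearch arr num fuel first last status index).1 then
         0 ≤ (pvBSearch arr num fuel first last status index).2 ∧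
         (pvBSearch arr num fuel first last status index).2 < (arr.length : Int) ∧
         num ≤ arr[(pvBSearch arr num fuel first last status index).2.toNat]! ∧
         (∀ k : Nat, k < (pvBSearch arr num fuel first last status index).2.toNat →
            arr[k]! < num ∨ arr[k]! = arr[(pvBSearch arr num fuel first last status index).2.toNat]!)
       else (pvBSearch arr num fuel first last status index).2 = 0 ∧
            (∀ k : Nat, k < arr.length → arr[k]! < num)) := by
  intro fuel
  induction fuel with
  | zero =>
      intro first last status index hf h0 hinv hleft
      exact pvBSearchExit arr num first last status index (by omega) hinv hleft
  | succ n ih =>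
      intro first last status index hf h0 hinv hleft
      by_cases hfl : first ≤ last
      · have hlast : last ≤ (arr.length : Int) - 1 := by
          by_cases hst : status = true <;> simp [hst] at hinv <;> omega
        simp only [pvBSearch]
        rw [if_pos hfl]
        have hb := PySem.Int.floordiv_two_mid_bounds hfl
        rw [Int.add_comm first last] at hb
        set md := PySem.Int.floordiv (last + first) 2 with hmd
        have hmdn : md.toNat < arr.length := by omega
        have hmdc : ((md.toNat : Nat) : Int) = md := by omega
        have hget : PySem.List.pyGet? arr md = some arr[md.toNat] := by
          rw [PySem.List.pyGet?_of_nonneg _ (by omega), List.getElem?_eq_getElem hmdn]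
        simp only [hget]
        have hbang : arr[md.toNat]! = arr[md.toNat] := getElem!_pos arr md.toNat hmdn
        by_cases h1 : num < arr[md.toNat]
        · rw [if_pos h1]
          exact ih first (md - 1) true md (by omega) h0
            (by simp only [if_true]
                exact ⟨by omega, by omega, by omega, by rw [hbang]; exact h1⟩) hleft
        · rw [if_neg h1]
          by_cases h2 : arr[md.toNat] < num
          · rw [if_pos h2]
            refine ih (md + 1) last status index (by omega) (by omega) hinv ?_
            intro k hk hkm
            rcases lt_or_ge (k : Int) first with hc | hc
            · exact hleft k hk hc
            · have hle : arr[k]! ≤ arr[md.toNat]! := pvSortedMono arr hs (by omega) hmdn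
              rw [hbang] at hle; omega
          · rw [if_neg h2]
            simp only [if_true]
            have heq : arr[md.toNat] = num := by omega
            refine ⟨by omega, by omega, by rw [hbang, heq], ?_⟩
            intro k hk
            have hle : arr[k]! ≤ arr[md.toNat]! := pvSortedMono arr hs (by omega) hmdn
            rcases lt_or_eq_of_le hle with hlt | he
            · left; rw [hbang, heq] at hlt; exact hlt
            · right; exact he
      · simp only [pvBSearch]
        rw [if_neg hfl]
        exact pvBSearchExit arr num first last status index (by omega) hinv hleft

theorem pvPopNat (m : List Int) (j : Int) (h0 : 0 ≤ j) (hl : j.toNat < m.length) :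
    PySem.List.pop? m j = some (m[j.toNat], m.eraseIdx j.toNat) := by
  obtain ⟨k, rfl⟩ : ∃ k : Nat, j = (k : Int) := ⟨j.toNat, by omega⟩
  simp only [Int.toNat_natCast]
  exact PySem.List.pop?_natCast m k (by simpa using hl)

theorem pvStepA_canon (res : List Int) (sc : Int) (rem : List Int) (i : Int)
    (hs : rem.Pairwise (· ≤ ·)) (hne : 0 < rem.length) :
    pvStepA (res, sc, rem) i = pvCanon (res, sc, rem) i := by
  have hTop : pvBSearchTop rem (i + 1)
      = pvBSearch rem (i + 1) (rem.length + 1) 0 ((rem.length : Int) - 1) false 0 := by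
    rw [pvBSearchTop]
  have hA := pvBSearch_spec rem (i + 1) hs (rem.length + 1) 0 ((rem.length : Int) - 1) false 0
      (by omega) (by omega) (by simp)
      (by intro k hk hk0; exact absurd hk0 (by omega))
  rw [← hTop] at hA
  have hlole : pvCLE rem i ≤ rem.length := pvCLE_le rem i
  by_cases hst : (pvBSearchTop rem (i + 1)).1 = true
  · simp only [hst, if_true] at hA
    obtain ⟨h0idx, hidxlen, hge, hblock⟩ := hA
    have hq2 : (pvBSearchTop rem (i + 1)).2.toNat < rem.length := by omega
    have hlole2 : pvCLE rem i ≤ (pvBSearchTop rem (i + 1)).2.toNat := by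
      by_contra hcon
      have h1 := pvCLE_low rem i (pvBSearchTop rem (i + 1)).2.toNat (by omega)
      omega
    have hlolt : pvCLE rem i < rem.length := by omega
    have hveq : rem[pvCLE rem i]! = rem[(pvBSearchTop rem (i + 1)).2.toNat]! := by
      rcases eq_or_lt_of_le hlole2 with he | hlt
      · rw [he]
      · rcases hblock (pvCLE rem i) hlt with h2 | h2
        · have := pvCLE_high rem hs i (pvCLE rem i) le_rfl hlolt
          omega
        · exact h2
    have herase : rem.eraseIdx (pvBSearchTop rem (i + 1)).2.toNat = rem.eraseIdx (pvCLE rem i) :=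
      pvEraseEq rem hs _ _ hq2 hlolt hveq.symm
    have hpopA : PySem.List.pop? rem (pvBSearchTop rem (i + 1)).2
        = some (rem[(pvBSearchTop rem (i + 1)).2.toNat], rem.eraseIdx (pvBSearchTop rem (i + 1)).2.toNat) :=
      pvPopNat rem _ (by omega) hq2
    simp only [pvStepA, pvCanon, hst, if_true, hpopA]
    rw [herase, if_pos hlolt, ← getElem!_pos rem _ hq2, ← hveq]
  · have hst' : (pvBSearchTop rem (i + 1)).1 = false := by
      revert hst; cases (pvBSearchTop rem (i + 1)).1 <;> simp
    simp only [hst', Bool.false_eq_true, if_false] at hA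
    obtain ⟨hidx0, hall⟩ := hA
    have hloeq : pvCLE rem i = rem.length := by
      exact pvTW_char _ rem rem.length le_rfl
        (fun k hk => by simpa using (by have := hall k hk; omega : rem[k]! ≤ i))
        (fun h => absurd h (by omega))
    have hpop0 : PySem.List.pop? rem 0 = some (rem[0], rem.eraseIdx 0) := by
      have := pvPopNat rem 0 (by omega) (by simpa using hne)
      simpa using this
    simp only [pvStepA, pvCanon, hst', Bool.false_eq_true, if_false, hidx0, hpop0]
    rw [if_neg (show ¬ pvCLE rem i < rem.length by omega), getElem!_pos rem 0 (by omega)]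

-- ---------- B's cut pass computes pvCLE for every desk position ----------

theorem pvAdvance_eq (sm : List Int) (hs : sm.Pairwise (· ≤ ·)) (v : Int) :
    ∀ (fuel : Nat) (t : Nat), sm.length - t ≤ fuel → t ≤ sm.length →
      (∀ k, k < t → sm[k]! ≤ v) → pvAdvance sm v fuel t = pvCLE sm v := by
  intro fuel
  induction fuel with
  | zero =>
      intro t hf ht hlow
      exact (pvTW_char _ sm t (by omega) (fun k hk => by simpa using hlow k hk)
        (fun h => absurd h (by omega))).symm
  | succ n ih =>
      intro t hf ht hlow
      simp only [pvAdvance]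
      by_cases hcond : t < sm.length ∧ sm.getD t 0 ≤ v
      · rw [if_pos hcond]
        obtain ⟨ht2, hv2⟩ := hcond
        have hgd : sm.getD t 0 = sm[t]! := by
          rw [List.getD_eq_getElem sm 0 ht2, getElem!_pos sm t ht2]
        exact ih (t + 1) (by omega) (by omega)
          (fun k hk => by
            rcases Nat.lt_succ_iff_lt_or_eq.mp hk with h | h
            · exact hlow k h
            · subst h; rw [← hgd]; exact hv2)
      · rw [if_neg hcond]
        by_cases ht2 : t < sm.length
        · have hv2 : ¬ sm.getD t 0 ≤ v := fun hv => hcond ⟨ht2, hv⟩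
          have hgd : sm.getD t 0 = sm[t]! := by
            rw [List.getD_eq_getElem sm 0 ht2, getElem!_pos sm t ht2]
          exact (pvTW_char _ sm t (by omega) (fun k hk => by simpa using hlow k hk)
            (fun _ => by simp only [decide_eq_false_iff_not]; rw [← hgd]; exact hv2)).symm
        · exact (pvTW_char _ sm t (by omega) (fun k hk => by simpa using hlow k hk)
            (fun h => absurd h (by omega))).symm

theorem pvCutFold_cons (sm : List Int) (jv : Int × Int) (ps : List (Int × Int)) (cut : List Nat) (t : Nat) :
    pvCutFold sm (jv :: ps) cut t
      = pvCutFold sm ps (cut.set jv.1.toNat (pvAdvance sm jv.2 (sm.length + 1) t))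
          (pvAdvance sm jv.2 (sm.length + 1) t) := rfl

theorem pvCutFold_frame (sm : List Int) : ∀ (ps : List (Int × Int)) (cut : List Nat) (t : Nat) (j : Nat),
    (∀ pr ∈ ps, pr.1.toNat ≠ j) → (pvCutFold sm ps cut t).1.getD j 0 = cut.getD j 0 := by
  intro ps
  induction ps with
  | nil => intro cut t j _; rfl
  | cons jv ps ih =>
      intro cut t j hne
      rw [pvCutFold_cons, ih _ _ _ (fun pr hpr => hne pr (List.mem_cons_of_mem _ hpr))]
      by_cases hlen : jv.1.toNat < cut.length
      · rw [pvGetDSet cut _ _ _ hlen, if_neg (fun h => hne jv (List.mem_cons_self) h.symm)]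
      · rw [List.set_eq_of_length_le (by omega)]

theorem pvCutFold_get (sm : List Int) (hs : sm.Pairwise (· ≤ ·)) :
    ∀ (ps : List (Int × Int)) (cut : List Nat) (t : Nat),
      t ≤ sm.length →
      (∀ pr ∈ ps, ∀ k, k < t → sm[k]! ≤ pr.2) →
      ps.Pairwise (fun a b => a.2 ≤ b.2) →
      (∀ pr ∈ ps, pr.1.toNat < cut.length) →
      (ps.map (fun pr => pr.1.toNat)).Nodup →
      ∀ pr ∈ ps, (pvCutFold sm ps cut t).1.getD pr.1.toNat 0 = pvCLE sm pr.2 := by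
  intro ps
  induction ps with
  | nil => intro cut t _ _ _ _ _ pr hpr; simp at hpr
  | cons jv ps ih =>
      intro cut t ht hlow hpw hlen hnd pr hpr
      have hadv : pvAdvance sm jv.2 (sm.length + 1) t = pvCLE sm jv.2 :=
        pvAdvance_eq sm hs jv.2 (sm.length + 1) t (by omega) ht
          (hlow jv List.mem_cons_self)
      rw [pvCutFold_cons]
      simp only [List.pairwise_cons] at hpw
      simp only [List.map_cons, List.nodup_cons] at hnd
      rcases List.mem_cons.mp hpr with rfl | hpr'
      · rw [show (pvCutFold sm ps (cut.set pr.1.toNat (pvAdvance sm pr.2 (sm.length + 1) t)) (pvAdvance sm pr.2 (sm.length + 1) t)).1.getD pr.1.toNat 0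
              = (cut.set pr.1.toNat (pvAdvance sm pr.2 (sm.length + 1) t)).getD pr.1.toNat 0 from
            pvCutFold_frame sm ps _ _ _ (fun pr' hpr' h => hnd.1 (h ▸ List.mem_map_of_mem hpr'))]
        rw [pvGetDSet cut _ _ _ (hlen pr List.mem_cons_self), if_pos rfl, hadv]
      · rw [hadv]
        exact ih (cut.set jv.1.toNat (pvCLE sm jv.2)) (pvCLE sm jv.2) (pvCLE_le sm jv.2)
          (fun pr' hm k hk => le_trans (pvCLE_low sm jv.2 k hk) (hpw.1 pr' hm))
          hpw.2
          (fun pr' hm => by rw [List.length_set]; exact hlen pr' (List.mem_cons_of_mem _ hm))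
          hnd.2 pr hpr'

-- the fully-instantiated cut fact
theorem pvCut_final (sm : List Int) (hs : sm.Pairwise (· ≤ ·)) (desk : List Int) :
    ∀ j, j < desk.length →
      ((pvCutFold sm (PySem.List.sorted (PySem.List.enumerate desk) (fun p => p.2) false)
          (List.replicate desk.length 0) 0).1).getD j 0 = pvCLE sm desk[j]! := by
  intro j hj
  set ps := PySem.List.sorted (PySem.List.enumerate desk) (fun p => p.2) false with hps
  have hperm : ps.Perm (PySem.List.enumerate desk 0) := PySem.List.sorted_perm _ _ _
  have hmem : ((j : Int), desk[j]!) ∈ ps := by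
    rw [hperm.mem_iff, PySem.List.mem_enumerate_iff]
    exact ⟨j, hj, by rw [getElem!_pos desk j hj]; simp⟩
  have hmapeq : (PySem.List.enumerate desk 0).map (fun pr => pr.1.toNat) = List.range desk.length := by
    apply List.ext_getElem
    · simp [PySem.List.length_enumerate]
    · intro k h1 h2
      simp [PySem.List.getElem_enumerate]
  have hnodupE : ((PySem.List.enumerate desk 0).map (fun pr => pr.1.toNat)).Nodup := by
    rw [hmapeq]; exact List.nodup_range
  have hnodup : (ps.map (fun pr => pr.1.toNat)).Nodup :=
    ((hperm.map (fun pr => pr.1.toNat)).nodup_iff).mpr hnodupE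
  have hlenfacts : ∀ pr ∈ ps, pr.1.toNat < (List.replicate desk.length 0).length := by
    intro pr hpr
    rw [hperm.mem_iff, PySem.List.mem_enumerate_iff] at hpr
    obtain ⟨k, hk, rfl⟩ := hpr
    simp; omega
  have := pvCutFold_get sm hs ps (List.replicate desk.length 0) 0 (by omega)
    (fun pr _ k hk => absurd hk (by omega))
    (PySem.List.sorted_pairwise _ _)
    hlenfacts hnodup ((j : Int), desk[j]!) hmem
  simpa using this

-- ---------- the next-alive pointer structure ----------

def pvInv (m : Nat) (nxt : List Nat) : Prop :=
  nxt.length = m + 1 ∧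
  (∀ p, p ≤ m → p ≤ nxt.getD p 0 ∧ nxt.getD p 0 ≤ m) ∧
  (∀ p q, p ≤ m → p ≤ q → q < nxt.getD p 0 → nxt.getD q 0 ≠ q)

theorem pvFind_spec (m : Nat) : ∀ (fuel : Nat) (nxt : List Nat) (p : Nat),
    pvInv m nxt → p ≤ m → m + 1 - p ≤ fuel →
    p ≤ (pvFind nxt p fuel).1 ∧ (pvFind nxt p fuel).1 ≤ m ∧
    pvInv m (pvFind nxt p fuel).2 ∧
    (∀ q, (pvFind nxt p fuel).2.getD q 0 = q ↔ nxt.getD q 0 = q) ∧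
    ((pvFind nxt p fuel).1 = m ∨ nxt.getD (pvFind nxt p fuel).1 0 = (pvFind nxt p fuel).1) ∧
    (∀ q, p ≤ q → q < (pvFind nxt p fuel).1 → nxt.getD q 0 ≠ q) := by
  intro fuel
  induction fuel with
  | zero => intro nxt p hinv hp hf; omega
  | succ n ih =>
      intro nxt p hinv hp hf
      obtain ⟨hlen, hbnd, hint⟩ := hinv
      have heq : pvFind nxt p (n + 1)
          = if nxt.getD p 0 = p then (p, nxt)
            else pvFind (nxt.set p (nxt.getD (nxt.getD p 0) 0)) (nxt.getD (nxt.getD p 0) 0) n := rfl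
      rw [heq]
      by_cases hq : nxt.getD p 0 = p
      · rw [if_pos hq]
        exact ⟨le_rfl, hp, ⟨hlen, hbnd, hint⟩, fun q => Iff.rfl, Or.inr hq,
          fun q h1 h2 => absurd (lt_of_le_of_lt h1 h2) (by omega)⟩
      · rw [if_neg hq]
        have hbp := hbnd p hp
        have hpq : p < nxt.getD p 0 := by omega
        set q := nxt.getD p 0 with hqdef
        have hqm : q ≤ m := hbp.2
        have hbq := hbnd q hqm
        set r := nxt.getD q 0 with hrdef
        have hqr : q ≤ r := hbq.1
        have hrm : r ≤ m := hbq.2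
        have hplen : p < nxt.length := by omega
        have hget : ∀ x, (nxt.set p r).getD x 0 = if x = p then r else nxt.getD x 0 :=
          fun x => pvGetDSet nxt p r x hplen
        have hdead : ∀ x, (nxt.set p r).getD x 0 = x ↔ nxt.getD x 0 = x := by
          intro x
          rw [hget x]
          by_cases hx : x = p
          · subst hx
            rw [if_pos rfl]
            constructor
            · intro h; omega
            · intro h; rw [← hqdef] at h; exact absurd h hq
          · rw [if_neg hx]
        have hinv' : pvInv m (nxt.set p r) := by
          refine ⟨by simp [hlen], ?_, ?_⟩
          · intro x hx
            rw [hget x]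
            by_cases hxp : x = p
            · subst hxp; rw [if_pos rfl]; omega
            · rw [if_neg hxp]; exact hbnd x hx
          · intro x y hx hxy hy
            rw [hget x] at hy
            intro hc
            have hcc := (hdead y).mp hc
            by_cases hxp : x = p
            · subst hxp
              rw [if_pos rfl] at hy
              by_cases hyq : y < q
              · exact hint x y hx hxy hyq hcc
              · exact hint q y hqm (by omega) (by omega) hcc
            · rw [if_neg hxp] at hy
              exact hint x y hx hxy hy hcc
        have hrec := ih (nxt.set p r) r hinv' hrm (by omega)
        refine ⟨by omega, hrec.2.1, hrec.2.2.1, ?_, ?_, ?_⟩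
        · intro x; rw [hrec.2.2.2.1 x, hdead x]
        · rcases hrec.2.2.2.2.1 with h | h
          · exact Or.inl h
          · rw [hdead] at h; exact Or.inr h
        · intro x h1 h2
          by_cases hxr : x < r
          · by_cases hxq : x < q
            · exact fun hc => (hint p x hp h1 hxq) hc
            · exact fun hc => (hint q x hqm (by omega) (by omega)) hc
          · have := hrec.2.2.2.2.2 x (by omega) h2
            exact fun hc => this ((hdead x).mpr hc)

-- alive positions and the induced remaining pool
def pvAliveIdx (m : Nat) (nxt : List Nat) : List Nat :=
  (List.range m).filter (fun p => nxt.getD p 0 == p)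

def pvRem (sm : List Int) (nxt : List Nat) : List Int :=
  (pvAliveIdx sm.length nxt).map (fun p => sm[p]!)

theorem pvAliveIdx_congr (m : Nat) (nxt nxt' : List Nat)
    (h : ∀ q, nxt'.getD q 0 = q ↔ nxt.getD q 0 = q) :
    pvAliveIdx m nxt' = pvAliveIdx m nxt := by
  unfold pvAliveIdx
  apply List.filter_congr
  intro x _
  by_cases hx : nxt.getD x 0 = x
  · rw [beq_iff_eq.mpr ((h x).mpr hx), beq_iff_eq.mpr hx]
  · rw [beq_eq_false_iff_ne.mpr (fun hc => hx ((h x).mp hc)),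
        beq_eq_false_iff_ne.mpr hx]

theorem pvAliveIdx_pairwise (m : Nat) (nxt : List Nat) : (pvAliveIdx m nxt).Pairwise (· < ·) :=
  (List.pairwise_lt_range).filter _

theorem pvAliveIdx_mem (m : Nat) (nxt : List Nat) (x : Nat) :
    x ∈ pvAliveIdx m nxt ↔ x < m ∧ nxt.getD x 0 = x := by
  simp [pvAliveIdx, List.mem_filter, List.mem_range]

theorem pvRem_sorted (sm : List Int) (hs : sm.Pairwise (· ≤ ·)) (nxt : List Nat) :
    (pvRem sm nxt).Pairwise (· ≤ ·) := by
  unfold pvRem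
  rw [List.pairwise_map]
  apply List.Pairwise.imp_of_mem (l := pvAliveIdx sm.length nxt)
    (R := (· < ·))
  · intro a b ha hb hab
    exact pvSortedMono sm hs (le_of_lt hab) ((pvAliveIdx_mem _ _ b).mp hb).1
  · exact pvAliveIdx_pairwise _ _

-- ---------- quicksort characterisation (A's pool is the sorted pool) ----------

theorem pvQsPart_len_sum (mid : Int) : ∀ (xs l r : List Int),
    (pvQsPart mid xs (l, r)).1.length + (pvQsPart mid xs (l, r)).2.length
      = xs.length + l.length + r.length
  | [], l, r => by simp [pvQsPart]
  | x :: xs, l, r => by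
      by_cases h : mid ≤ x
      · simp only [pvQsPart, h, if_true]
        have := pvQsPart_len_sum mid xs l (r ++ [x]); simp at this ⊢; omega
      · simp only [pvQsPart, h, if_false]
        have := pvQsPart_len_sum mid xs (l ++ [x]) r; simp at this ⊢; omega

theorem pvQsPart_eq (mid : Int) : ∀ (xs l r : List Int),
    pvQsPart mid xs (l, r)
      = (l ++ xs.filter (fun x => decide (x < mid)), r ++ xs.filter (fun x => decide (mid ≤ x)))
  | [], l, r => by simp [pvQsPart]
  | x :: xs, l, r => by
      by_cases h : mid ≤ x
      · simp only [pvQsPart, h, if_true, pvQsPart_eq mid xs]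
        simp [h, show ¬ x < mid by omega]
      · simp only [pvQsPart, h, if_false, pvQsPart_eq mid xs]
        simp [h, show x < mid by omega]

-- mid ∈ arr and arr.remove(mid) = arr.erase mid, for the quicksort pivot
theorem pvMidFacts (arr : List Int) (h : ¬ arr.length < 2) :
    ((PySem.List.pyGet? arr (PySem.Int.floordiv (arr.length : Int) 2)).getD 0) ∈ arr ∧
    ((PySem.List.remove? arr ((PySem.List.pyGet? arr (PySem.Int.floordiv (arr.length : Int) 2)).getD 0)).getD arr)
      = arr.erase ((PySem.List.pyGet? arr (PySem.Int.floordiv (arr.length : Int) 2)).getD 0) := by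
  have hlen : arr.length / 2 < arr.length := by omega
  have hfd : PySem.Int.floordiv (arr.length : Int) 2 = ((arr.length / 2 : Nat) : Int) := by
    rw [PySem.Int.floordiv_eq_ediv_of_pos (by norm_num)]; omega
  have hg : PySem.List.pyGet? arr (PySem.Int.floordiv (arr.length : Int) 2) = some arr[arr.length / 2] := by
    rw [hfd, PySem.List.pyGet?_natCast, List.getElem?_eq_getElem hlen]
  rw [hg]
  simp only [Option.getD_some]
  refine ⟨List.getElem_mem hlen, ?_⟩
  rw [PySem.List.remove?_eq_some_erase arr _ (List.getElem_mem hlen)]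
  simp

theorem pvPartPerm (x : Int) (ys : List Int) :
    ((pvQsPart x ys ([], [])).1 ++ (pvQsPart x ys ([], [])).2).Perm ys := by
  rw [pvQsPart_eq]
  simp only [List.nil_append]
  have hc : (fun y => !decide (y < x)) = fun y => decide (x ≤ y) := by
    funext y; by_cases h : y < x <;> simp [h, not_lt.mp]
  have := List.filter_append_perm (fun y => decide (y < x)) ys
  rwa [hc] at this

theorem quickSortA_perm : ∀ (n : Nat) (arr : List Int), arr.length ≤ n → (quickSortA n arr).Perm arr := by
  intro n
  induction n with
  | zero =>
      intro arr hlen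
      have : arr = [] := by cases arr <;> simp_all
      subst this; simp [quickSortA]
  | succ n ih =>
      intro arr hlen
      simp only [quickSortA]
      by_cases h : arr.length < 2
      · simp [h]
      · rw [if_neg h]
        obtain ⟨hmem, herase⟩ := pvMidFacts arr h
        set x := ((PySem.List.pyGet? arr (PySem.Int.floordiv (arr.length : Int) 2)).getD 0) with hx
        simp only [herase]
        have hsum := pvQsPart_len_sum x (arr.erase x) [] []
        simp only [List.length_nil, Nat.add_zero] at hsum
        have herlen : (arr.erase x).length = arr.length - 1 := List.length_erase_of_mem hmem
        have h1 := ih (pvQsPart x (arr.erase x) ([], [])).1 (by omega)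
        have h2 := ih (pvQsPart x (arr.erase x) ([], [])).2 (by omega)
        have t1 := h1.append (h2.cons x)
        have t2 : ((pvQsPart x (arr.erase x) ([], [])).1 ++
            x :: (pvQsPart x (arr.erase x) ([], [])).2).Perm
            (x :: ((pvQsPart x (arr.erase x) ([], [])).1 ++ (pvQsPart x (arr.erase x) ([], [])).2)) :=
          List.perm_middle
        have t4 := (pvPartPerm x (arr.erase x)).cons x
        have t5 := List.perm_cons_erase hmem
        exact t1.trans (t2.trans (t4.trans t5.symm))

theorem quickSortA_sorted' : ∀ (n : Nat) (arr : List Int), arr.length ≤ n → (quickSortA n arr).Pairwise (· ≤ ·) := by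
  intro n
  induction n with
  | zero =>
      intro arr hlen
      have : arr = [] := by cases arr <;> simp_all
      subst this; simp [quickSortA]
  | succ n ih =>
      intro arr hlen
      simp only [quickSortA]
      by_cases h : arr.length < 2
      · rw [if_pos h]
        match arr, h with
        | [], _ => simp
        | [a], _ => simp
      · rw [if_neg h]
        obtain ⟨hmem, herase⟩ := pvMidFacts arr h
        set x := ((PySem.List.pyGet? arr (PySem.Int.floordiv (arr.length : Int) 2)).getD 0) with hx
        simp only [herase]
        have hsum := pvQsPart_len_sum x (arr.erase x) [] []
        simp only [List.length_nil, Nat.add_zero] at hsum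
        have herlen : (arr.erase x).length = arr.length - 1 := List.length_erase_of_mem hmem
        have h1 := ih (pvQsPart x (arr.erase x) ([], [])).1 (by omega)
        have h2 := ih (pvQsPart x (arr.erase x) ([], [])).2 (by omega)
        have hmeml : ∀ y ∈ quickSortA n (pvQsPart x (arr.erase x) ([], [])).1, y < x := by
          intro y hy
          have := (quickSortA_perm n (pvQsPart x (arr.erase x) ([], [])).1 (by omega)).mem_iff.mp hy
          rw [pvQsPart_eq] at this
          simp only [List.nil_append, List.mem_filter, decide_eq_true_eq] at this
          exact this.2
        have hmemr : ∀ y ∈ quickSortA n (pvQsPart x (arr.erase x) ([], [])).2, x ≤ y := by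
          intro y hy
          have := (quickSortA_perm n (pvQsPart x (arr.erase x) ([], [])).2 (by omega)).mem_iff.mp hy
          rw [pvQsPart_eq] at this
          simp only [List.nil_append, List.mem_filter, decide_eq_true_eq] at this
          exact this.2
        rw [List.pairwise_append]
        refine ⟨h1, ?_, ?_⟩
        · rw [List.pairwise_cons]
          exact ⟨hmemr, h2⟩
        · intro a ha b hb
          rcases List.mem_cons.mp hb with hb | hb
          · exact le_of_lt (hb ▸ hmeml a ha)
          · exact le_of_lt (lt_of_lt_of_le (hmeml a ha) (hmemr b hb))

theorem quickSortA_sorted (arr : List Int) : (quickSortA arr.length arr).Pairwise (· ≤ ·) :=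
  quickSortA_sorted' arr.length arr le_rfl

theorem quickSortA_eq_sorted (mine : List Int) :
    PySem.List.sorted mine (fun x => x) false = quickSortA mine.length mine :=
  PySem.List.sorted_id_eq_of_perm_of_pairwise _ _ (quickSortA_perm mine.length mine le_rfl)
    (quickSortA_sorted mine)

-- ---------- deleting an alive position ----------

theorem pvGetBangMap (f : Nat → Int) (A : List Nat) (k : Nat) (hk : k < A.length) :
    (A.map f)[k]! = f A[k] := by
  rw [getElem!_pos (A.map f) k (by simpa using hk), List.getElem_map]

theorem pvDelInv (m : Nat) (nxt : List Nat) (hinv : pvInv m nxt) (p : Nat) (hp : p < m) :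
    pvInv m (nxt.set p (p + 1)) := by
  obtain ⟨hlen, hbnd, hint⟩ := hinv
  have hplen : p < nxt.length := by omega
  have hget : ∀ x, (nxt.set p (p + 1)).getD x 0 = if x = p then p + 1 else nxt.getD x 0 :=
    fun x => pvGetDSet nxt p (p + 1) x hplen
  refine ⟨by simp [hlen], ?_, ?_⟩
  · intro x hx
    rw [hget x]
    by_cases hxp : x = p
    · subst hxp; rw [if_pos rfl]; omega
    · rw [if_neg hxp]; exact hbnd x hx
  · intro x y hx hxy hy
    rw [hget x] at hy
    rw [hget y]
    by_cases hyp : y = p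
    · subst hyp; rw [if_pos rfl]; omega
    · rw [if_neg hyp]
      by_cases hxp : x = p
      · subst hxp
        rw [if_pos rfl] at hy
        omega
      · rw [if_neg hxp] at hy
        exact hint x y hx hxy hy

theorem pvDelAlive (m : Nat) (nxt : List Nat) (hinv : pvInv m nxt) (p : Nat) (hp : p < m) :
    pvAliveIdx m (nxt.set p (p + 1)) = (pvAliveIdx m nxt).filter (fun y => decide (¬ y = p)) := by
  have hplen : p < nxt.length := by have := hinv.1; omega
  have hget : ∀ x, (nxt.set p (p + 1)).getD x 0 = if x = p then p + 1 else nxt.getD x 0 :=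
    fun x => pvGetDSet nxt p (p + 1) x hplen
  unfold pvAliveIdx
  rw [List.filter_filter]
  apply List.filter_congr
  intro y _
  rw [hget y]
  by_cases hyp : y = p
  · subst hyp
    rw [if_pos rfl]
    simp
  · rw [if_neg hyp]
    simp [hyp]

theorem pvFilterNe (p : Nat) (A B : List Nat) (hA : ∀ a ∈ A, a < p) (hB : ∀ b ∈ B, p < b) :
    (A ++ p :: B).filter (fun y => decide (¬ y = p)) = A ++ B := by
  rw [List.filter_append]
  rw [List.filter_eq_self.mpr (fun a ha => by have := hA a ha; simp; omega)]
  simp only [List.filter_cons]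
  rw [if_neg (by simp)]
  rw [List.filter_eq_self.mpr (fun b hb => by have := hB b hb; simp; omega)]

theorem pvFilterNeCons (p : Nat) (B : List Nat) (hB : ∀ b ∈ B, p < b) :
    (p :: B).filter (fun y => decide (¬ y = p)) = B := by
  have := pvFilterNe p [] B (by intro a ha; simp at ha) hB
  simpa using this

theorem pvCanon_len (res : List Int) (sc : Int) (rem : List Int) (i : Int) (hne : 0 < rem.length) :
    (pvCanon (res, sc, rem) i).2.2.length + 1 = rem.length := by
  by_cases h : pvCLE rem i < rem.length
  · have he : pvCanon (res, sc, rem) i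
        = (res ++ [rem[pvCLE rem i]!], sc + 1, rem.eraseIdx (pvCLE rem i)) := by
      simp only [pvCanon]
      rw [if_pos h]
    rw [he]
    show (rem.eraseIdx (pvCLE rem i)).length + 1 = rem.length
    rw [List.length_eraseIdx, if_pos h]
    omega
  · have he : pvCanon (res, sc, rem) i = (res ++ [rem[0]!], sc, rem.eraseIdx 0) := by
      simp only [pvCanon]
      rw [if_neg h]
    rw [he]
    show (rem.eraseIdx 0).length + 1 = rem.length
    rw [List.length_eraseIdx, if_pos hne]
    omega

-- ===== one step of B equals one canonical step on the induced pool =====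

theorem pvAliveSplit (m : Nat) (nxt : List Nat) (p : Nat) (hp : p ∈ pvAliveIdx m nxt) :
    ∃ A B, pvAliveIdx m nxt = A ++ p :: B ∧ (∀ a ∈ A, a < p) ∧ (∀ b ∈ B, p < b) := by
  obtain ⟨A, B, hAB⟩ := List.append_of_mem hp
  have hpw := pvAliveIdx_pairwise m nxt
  rw [hAB] at hpw
  refine ⟨A, B, hAB, ?_, ?_⟩
  · intro a ha
    have := (List.pairwise_append.mp hpw).2.2 a ha p (List.mem_cons_self)
    exact this
  · have := List.pairwise_cons.mp (List.pairwise_append.mp hpw).2.1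
    exact fun b hb => this.1 b hb

theorem pvStepB_canon (sm : List Int) (hs : sm.Pairwise (· ≤ ·)) (i : Int)
    (res : List Int) (sc : Int) (nxt : List Nat)
    (hinv : pvInv sm.length nxt) (hne : 0 < (pvRem sm nxt).length) :
    pvStepB sm (res, sc, nxt) (pvCLE sm i) =
      ((pvCanon (res, sc, pvRem sm nxt) i).1, (pvCanon (res, sc, pvRem sm nxt) i).2.1,
        (pvStepB sm (res, sc, nxt) (pvCLE sm i)).2.2) ∧
    pvInv sm.length (pvStepB sm (res, sc, nxt) (pvCLE sm i)).2.2 ∧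
    pvRem sm (pvStepB sm (res, sc, nxt) (pvCLE sm i)).2.2 = (pvCanon (res, sc, pvRem sm nxt) i).2.2 := by
  have hlen1 : nxt.length = sm.length + 1 := hinv.1
  have hcle : pvCLE sm i ≤ sm.length := pvCLE_le sm i
  obtain ⟨hFp1, hFp2, hFinv, hFiff, hFalive, hFskip⟩ :=
    pvFind_spec sm.length nxt.length nxt (pvCLE sm i) hinv hcle (by omega)
  have halive_nxt1 : pvAliveIdx sm.length (pvFind nxt (pvCLE sm i) nxt.length).2
      = pvAliveIdx sm.length nxt :=
    pvAliveIdx_congr _ _ _ hFiff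
  by_cases hp : (pvFind nxt (pvCLE sm i) nxt.length).1 < sm.length
  · -- a strictly greater card exists: take it
    have hpalive : nxt.getD (pvFind nxt (pvCLE sm i) nxt.length).1 0
        = (pvFind nxt (pvCLE sm i) nxt.length).1 := by
      rcases hFalive with h | h
      · omega
      · exact h
    have hpmem : (pvFind nxt (pvCLE sm i) nxt.length).1 ∈ pvAliveIdx sm.length nxt :=
      (pvAliveIdx_mem _ _ _).mpr ⟨hp, hpalive⟩
    obtain ⟨A, B, hAB, hA, hB⟩ := pvAliveSplit _ _ _ hpmem
    have hAv : ∀ a ∈ A, sm[a]! ≤ i := by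
      intro a ha
      have hamem : a ∈ pvAliveIdx sm.length nxt := by
        rw [hAB]; exact List.mem_append_left _ ha
      have halive := ((pvAliveIdx_mem _ _ a).mp hamem).2
      by_cases hac : a < pvCLE sm i
      · exact pvCLE_low sm i a hac
      · exact absurd halive (hFskip a (by omega) (hA a ha))
    have hpv : i < sm[(pvFind nxt (pvCLE sm i) nxt.length).1]! := pvCLE_high sm hs i _ hFp1 hp
    have hrem : pvRem sm nxt
        = A.map (fun a => sm[a]!) ++ sm[(pvFind nxt (pvCLE sm i) nxt.length).1]!
            :: B.map (fun a => sm[a]!) := by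
      unfold pvRem; rw [hAB]; simp
    have hremlen : (pvRem sm nxt).length = A.length + (B.length + 1) := by
      rw [hrem]; simp
    have hlo : pvCLE (pvRem sm nxt) i = A.length := by
      refine pvTW_char _ _ A.length (by omega) ?_ ?_
      · intro k hk
        rw [hrem, pvGetBangAppend (X := A.map (fun a => sm[a]!)) k (by simpa using hk),
            pvGetBangMap _ A k hk]
        simp only [decide_eq_true_eq]
        exact hAv A[k] (List.getElem_mem hk)
      · intro _
        rw [hrem, show A.length = (A.map (fun a => sm[a]!)).length by simp, pvGetBangMid]
        simp only [decide_eq_false_iff_not, not_le]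
        exact hpv
    have hlolt : pvCLE (pvRem sm nxt) i < (pvRem sm nxt).length := by omega
    have hcanon : pvCanon (res, sc, pvRem sm nxt) i
        = (res ++ [sm[(pvFind nxt (pvCLE sm i) nxt.length).1]!], sc + 1,
            A.map (fun a => sm[a]!) ++ B.map (fun a => sm[a]!)) := by
      simp only [pvCanon]
      rw [if_pos hlolt, hlo, hrem,
          show A.length = (A.map (fun a => sm[a]!)).length by simp,
          pvGetBangMid, pvEraseIdxMid]
    have hgd : sm.getD (pvFind nxt (pvCLE sm i) nxt.length).1 0
        = sm[(pvFind nxt (pvCLE sm i) nxt.length).1]! := by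
      rw [List.getD_eq_getElem sm 0 hp, getElem!_pos sm _ hp]
    simp only [pvStepB, if_pos hp]
    refine ⟨by rw [hcanon, hgd], pvDelInv _ _ hFinv _ hp, ?_⟩
    conv_lhs =>
      unfold pvRem
      rw [pvDelAlive _ _ hFinv _ hp, halive_nxt1, hAB, pvFilterNe _ A B hA hB, List.map_append]
    rw [hcanon]
  · -- no remaining card beats i: take the smallest remaining one
    have hAv : ∀ a ∈ pvAliveIdx sm.length nxt, sm[a]! ≤ i := by
      intro a ha
      obtain ⟨ham, halive⟩ := (pvAliveIdx_mem _ _ a).mp ha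
      by_cases hac : a < pvCLE sm i
      · exact pvCLE_low sm i a hac
      · exact absurd halive (hFskip a (by omega) (by omega))
    have hlo : pvCLE (pvRem sm nxt) i = (pvRem sm nxt).length := by
      refine pvTW_char _ _ _ le_rfl ?_ (fun h => absurd h (lt_irrefl _))
      intro k hk
      have hk' : k < (pvAliveIdx sm.length nxt).length := by
        simpa [pvRem] using hk
      unfold pvRem
      rw [pvGetBangMap _ _ k hk']
      simp only [decide_eq_true_eq]
      exact hAv _ (List.getElem_mem hk')
    obtain ⟨hGp1, hGp2, hGinv, hGiff, hGalive, hGskip⟩ :=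
      pvFind_spec sm.length (pvFind nxt (pvCLE sm i) nxt.length).2.length
        (pvFind nxt (pvCLE sm i) nxt.length).2 0 hFinv (Nat.zero_le _)
        (by have := hFinv.1; omega)
    have halive_nxt2 : pvAliveIdx sm.length
        (pvFind (pvFind nxt (pvCLE sm i) nxt.length).2 0 (pvFind nxt (pvCLE sm i) nxt.length).2.length).2
        = pvAliveIdx sm.length nxt := by
      rw [pvAliveIdx_congr _ _ _ hGiff, halive_nxt1]
    have hremne : pvAliveIdx sm.length nxt ≠ [] := by
      intro hnil
      unfold pvRem at hne
      rw [hnil] at hne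
      simp at hne
    have hg : (pvFind (pvFind nxt (pvCLE sm i) nxt.length).2 0 (pvFind nxt (pvCLE sm i) nxt.length).2.length).1 < sm.length := by
      by_contra hc
      apply hremne
      rw [List.eq_nil_iff_forall_not_mem]
      intro x hx
      obtain ⟨hxm, hxal⟩ := (pvAliveIdx_mem _ _ x).mp hx
      exact hGskip x (Nat.zero_le x) (by omega) ((hFiff x).mpr hxal)
    have hgalive : nxt.getD (pvFind (pvFind nxt (pvCLE sm i) nxt.length).2 0 (pvFind nxt (pvCLE sm i) nxt.length).2.length).1 0
        = (pvFind (pvFind nxt (pvCLE sm i) nxt.length).2 0 (pvFind nxt (pvCLE sm i) nxt.length).2.length).1 := by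
      rcases hGalive with h | h
      · omega
      · exact (hFiff _).mp h
    have hgmem : (pvFind (pvFind nxt (pvCLE sm i) nxt.length).2 0 (pvFind nxt (pvCLE sm i) nxt.length).2.length).1 ∈ pvAliveIdx sm.length nxt :=
      (pvAliveIdx_mem _ _ _).mpr ⟨hg, hgalive⟩
    obtain ⟨A, B, hAB, hA, hB⟩ := pvAliveSplit _ _ _ hgmem
    have hAnil : A = [] := by
      rw [List.eq_nil_iff_forall_not_mem]
      intro a ha
      have hamem : a ∈ pvAliveIdx sm.length nxt := by
        rw [hAB]; exact List.mem_append_left _ ha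
      have halive := ((pvAliveIdx_mem _ _ a).mp hamem).2
      exact hGskip a (Nat.zero_le a) (by have := hA a ha; omega) ((hFiff a).mpr halive)
    rw [hAnil] at hAB
    simp only [List.nil_append] at hAB
    have hrem : pvRem sm nxt
        = sm[(pvFind (pvFind nxt (pvCLE sm i) nxt.length).2 0 (pvFind nxt (pvCLE sm i) nxt.length).2.length).1]!
            :: B.map (fun a => sm[a]!) := by
      unfold pvRem; rw [hAB]; simp
    have hcanon : pvCanon (res, sc, pvRem sm nxt) i
        = (res ++ [sm[(pvFind (pvFind nxt (pvCLE sm i) nxt.length).2 0 (pvFind nxt (pvCLE sm i) nxt.length).2.length).1]!],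
            sc, B.map (fun a => sm[a]!)) := by
      simp only [pvCanon]
      rw [if_neg (by rw [hlo]; exact lt_irrefl _), hrem]
      simp [List.eraseIdx]
    have hgd : sm.getD (pvFind (pvFind nxt (pvCLE sm i) nxt.length).2 0 (pvFind nxt (pvCLE sm i) nxt.length).2.length).1 0
        = sm[(pvFind (pvFind nxt (pvCLE sm i) nxt.length).2 0 (pvFind nxt (pvCLE sm i) nxt.length).2.length).1]! := by
      rw [List.getD_eq_getElem sm 0 hg, getElem!_pos sm _ hg]
    simp only [pvStepB, if_neg hp]
    refine ⟨by rw [hcanon, hgd], pvDelInv _ _ hGinv _ hg, ?_⟩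
    conv_lhs =>
      unfold pvRem
      rw [pvDelAlive _ _ hGinv _ hg, halive_nxt2, hAB, pvFilterNeCons _ B hB]
    rw [hcanon]

theorem pvMain (sm : List Int) (hs : sm.Pairwise (· ≤ ·)) (cut : List Nat) (desk : List Int)
    (hcut : ∀ j, j < desk.length → cut.getD j 0 = pvCLE sm desk[j]!) :
    ∀ (js : List Nat) (res : List Int) (sc : Int) (nxt : List Nat),
      pvInv sm.length nxt →
      (∀ j ∈ js, j < desk.length) →
      js.length ≤ (pvRem sm nxt).length →
      (js.map (fun j => desk[j]!)).foldl pvStepA (res, sc, pvRem sm nxt) =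
        ((js.foldl (fun s j => pvStepB sm s (cut.getD j 0)) (res, sc, nxt)).1,
         (js.foldl (fun s j => pvStepB sm s (cut.getD j 0)) (res, sc, nxt)).2.1,
         pvRem sm (js.foldl (fun s j => pvStepB sm s (cut.getD j 0)) (res, sc, nxt)).2.2) := by
  intro js
  induction js with
  | nil => intro res sc nxt _ _ _; rfl
  | cons j js ih =>
      intro res sc nxt hinv hjs hlen
      have hj : j < desk.length := hjs j List.mem_cons_self
      have hne : 0 < (pvRem sm nxt).length := by
        simp only [List.length_cons] at hlen; omega
      simp only [List.map_cons, List.foldl_cons]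
      rw [pvStepA_canon res sc (pvRem sm nxt) desk[j]! (pvRem_sorted sm hs nxt) hne,
          hcut j hj]
      obtain ⟨hstep, hinv', hrem'⟩ := pvStepB_canon sm hs desk[j]! res sc nxt hinv hne
      have h1 : (pvStepB sm (res, sc, nxt) (pvCLE sm desk[j]!)).1
          = (pvCanon (res, sc, pvRem sm nxt) desk[j]!).1 := by rw [hstep]
      have h2 : (pvStepB sm (res, sc, nxt) (pvCLE sm desk[j]!)).2.1
          = (pvCanon (res, sc, pvRem sm nxt) desk[j]!).2.1 := by rw [hstep]
      have hcaneq : pvCanon (res, sc, pvRem sm nxt) desk[j]!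
          = ((pvStepB sm (res, sc, nxt) (pvCLE sm desk[j]!)).1,
             (pvStepB sm (res, sc, nxt) (pvCLE sm desk[j]!)).2.1,
             pvRem sm (pvStepB sm (res, sc, nxt) (pvCLE sm desk[j]!)).2.2) := by
        rw [h1, h2, hrem']
      rw [hcaneq]
      have hl2 : js.length ≤ (pvRem sm (pvStepB sm (res, sc, nxt) (pvCLE sm desk[j]!)).2.2).length := by
        rw [hrem']
        have := pvCanon_len res sc (pvRem sm nxt) desk[j]! hne
        simp only [List.length_cons] at hlen
        omega
      exact ih _ _ _ hinv' (fun x hx => hjs x (List.mem_cons_of_mem _ hx)) hl2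

-- ===== VERDICT (by name: the statement is the Claim_ definition above) =====
theorem get_high_score_spec : Claim_equal_get_high_score := by
  intro desk mine _ hpre
  unfold Spec_get_high_score
  simp only [get_high_score, get_high_score_alt]
  have hs : (PySem.List.sorted mine (fun x => x) false).Pairwise (· ≤ ·) :=
    PySem.List.sorted_pairwise mine (fun x => x)
  have hql : quickSortA mine.length mine = PySem.List.sorted mine (fun x => x) false :=
    (quickSortA_eq_sorted mine).symm
  have hlen : (PySem.List.sorted mine (fun x => x) false).length = mine.length :=
    PySem.List.length_sorted mine (fun x => x) false
  have hgetr : ∀ n p : Nat, p < n + 1 → (List.range (n + 1)).getD p 0 = p := by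
    intro n p hp
    rw [List.getD_eq_getElem _ 0 (by simpa using hp), List.getElem_range]
  have hinv0 : pvInv (PySem.List.sorted mine (fun x => x) false).length
      (List.range ((PySem.List.sorted mine (fun x => x) false).length + 1)) := by
    refine ⟨List.length_range, ?_, ?_⟩
    · intro p hp
      rw [hgetr _ p (by omega)]
      omega
    · intro p q hp hpq hq
      rw [hgetr _ p (by omega)] at hq
      omega
  have hrem0 : pvRem (PySem.List.sorted mine (fun x => x) false)
      (List.range ((PySem.List.sorted mine (fun x => x) false).length + 1))
      = PySem.List.sorted mine (fun x => x) false := by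
    unfold pvRem pvAliveIdx
    rw [List.filter_eq_self.mpr ?_]
    · exact pvMapRangeGetBang _
    · intro p hp
      rw [hgetr _ p (by have := List.mem_range.mp hp; omega)]
      simp
  have hmain := pvMain (PySem.List.sorted mine (fun x => x) false) hs
      ((pvCutFold (PySem.List.sorted mine (fun x => x) false)
          (PySem.List.sorted (PySem.List.enumerate desk) (fun p => p.2) false)
          (List.replicate desk.length 0) 0).1) desk
      (pvCut_final _ hs desk)
      (List.range desk.length) [] 0
      (List.range ((PySem.List.sorted mine (fun x => x) false).length + 1))
      hinv0 (fun j hj => List.mem_range.mp hj)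
      (by rw [List.length_range, hrem0, hlen]; exact hpre)
  rw [hrem0, pvMapRangeGetBang desk] at hmain
  rw [hql, hmain]
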